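-- pv_equiv track=rewrite | github.com/meenu-gupta/huma-server-sdk | sdk/common/utils/common_functions_utils.py | find_last_less_or_equal_element_index
-- ===== SOURCE A (Python) =====
-- def find_last_less_or_equal_element_index(item: int, items: list[int]) -> int:
--     """Returns index of the last element in array that is less or equal to item"""
--     if not items:
--         return -1
--     items = sorted(items)
--     for last_index, e in enumerate(items):
--         if item >= e:
--             continue
--         return last_index - 1
--
--     return last_index
-- ===== SOURCE B (Python) =====
-- def find_last_less_or_equal_element_index(item: int, items: list[int]) -> int:
--     """Index of the last element <= item in sorted(items): that is simply
--     (number of elements <= item) - 1, so count in one pass without sorting."""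
--     return sum(1 for e in items if e <= item) - 1
-- ===== Notes on version B (the rewrite author's own statement) =====
-- stated objective: faster
-- what changed: B replaces A's sort-then-linear-scan with a single counting pass: the index of the last element <= item in the sorted copy equals (number of elements <= item) - 1, so no sort and no enumerate loop.
import Mathlib
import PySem

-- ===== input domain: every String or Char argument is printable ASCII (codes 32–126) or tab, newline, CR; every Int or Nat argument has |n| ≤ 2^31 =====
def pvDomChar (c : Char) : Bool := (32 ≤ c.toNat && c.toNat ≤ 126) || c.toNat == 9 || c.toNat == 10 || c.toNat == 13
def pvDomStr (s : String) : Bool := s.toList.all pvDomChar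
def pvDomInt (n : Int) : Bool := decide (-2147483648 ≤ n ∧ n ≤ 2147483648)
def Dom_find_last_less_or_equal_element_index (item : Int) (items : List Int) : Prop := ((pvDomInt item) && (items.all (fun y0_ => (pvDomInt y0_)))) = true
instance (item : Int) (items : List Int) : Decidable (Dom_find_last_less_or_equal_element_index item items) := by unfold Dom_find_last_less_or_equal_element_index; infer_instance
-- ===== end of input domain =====

-- B drops A's sort and scan: the answer is (count of elements ≤ item) - 1, one pass (objective: faster).

-- ===== PORT A =====
-- A's for-loop over enumerate(sorted(items)): index i, continue while item ≥ e;
-- on the first e with e > item return i - 1; if the loop finishes, last_index = len-1 = i - 1 too.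
def pvLoopA (item : Int) (i : Int) : List Int → Int
  | [] => i - 1
  | e :: rest => if item ≥ e then pvLoopA item (i + 1) rest else i - 1

def find_last_less_or_equal_element_index (item : Int) (items : List Int) : Int :=
  if items = [] then -1
  else pvLoopA item 0 (PySem.List.sorted items (fun x => x))

-- ===== PORT B =====
-- sum(1 for e in items if e <= item) - 1, the generator-sum as a fold
def find_last_less_or_equal_element_index_alt (item : Int) (items : List Int) : Int :=
  (items.foldl (fun acc e => if e ≤ item then acc + 1 else acc) 0) - 1

-- ===== PRECONDITION & SPEC =====
def Spec_find_last_less_or_equal_element_index (item : Int) (items : List Int) (out : Int) : Prop := out = find_last_less_or_equal_element_index_alt item items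
instance (item : Int) (items : List Int) (out : Int) : Decidable (Spec_find_last_less_or_equal_element_index item items out) := by unfold Spec_find_last_less_or_equal_element_index; infer_instance

-- ===== CLAIM (what is proved, stated in full; the proofs are below) =====
def Claim_equal_find_last_less_or_equal_element_index : Prop := ∀ (item : Int) (items : List Int), Dom_find_last_less_or_equal_element_index item items → Spec_find_last_less_or_equal_element_index item items (find_last_less_or_equal_element_index item items)

-- ===== LEMMAS AND PROOFS =====

-- B's fold is a count
theorem pvFoldl_count (item : Int) (xs : List Int) (acc : Int) :
    xs.foldl (fun acc e => if e ≤ item then acc + 1 else acc) acc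
      = acc + (xs.countP (fun e => decide (e ≤ item)) : Int) := by
  induction xs generalizing acc with
  | nil => simp
  | cons e rest ih =>
    simp only [List.foldl_cons, List.countP_cons, ih]
    by_cases h : e ≤ item <;> simp [h, ih] <;> ring

-- A's scan over a ≤-sorted list returns i + count(≤ item) - 1
theorem pvLoopA_count (item : Int) (xs : List Int) (i : Int)
    (hs : xs.Pairwise (· ≤ ·)) :
    pvLoopA item i xs = i + (xs.countP (fun e => decide (e ≤ item)) : Int) - 1 := by
  induction xs generalizing i with
  | nil => simp [pvLoopA]
  | cons e rest ih =>
    rcases List.pairwise_cons.mp hs with ⟨hall, hrest⟩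
    by_cases h : e ≤ item
    · have hge : item ≥ e := h
      simp only [pvLoopA, List.countP_cons, h]
      rw [ih (i + 1) hrest]
      simp; ring
    · have hne : ¬ item ≥ e := h
      have hz : rest.countP (fun e => decide (e ≤ item)) = 0 := by
        rw [List.countP_eq_zero]
        intro b hb
        have := hall b hb
        simp only [decide_eq_true_eq]
        omega
      simp only [pvLoopA, List.countP_cons, h, hz]
      simp

-- ===== VERDICT (by name: the statement is the Claim_ definition above) =====
theorem find_last_less_or_equal_element_index_spec : Claim_equal_find_last_less_or_equal_element_index := by
  intro item items _
  unfold Spec_find_last_less_or_equal_element_index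
  unfold find_last_less_or_equal_element_index find_last_less_or_equal_element_index_alt
  rw [pvFoldl_count]
  by_cases hnil : items = []
  · simp [hnil]
  · rw [if_neg hnil]
    have hperm : (PySem.List.sorted items (fun x => x)).Perm items :=
      PySem.List.sorted_perm items (fun x => x) false
    have hpw : (PySem.List.sorted items (fun x => x)).Pairwise (· ≤ ·) :=
      PySem.List.sorted_pairwise items (fun x => x)
    rw [pvLoopA_count item _ 0 hpw, hperm.countP_eq]
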